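-- pv_equiv track=rewrite | github.com/miliar/Code_Jam_Webscraper | solutions_python/Problem_179/1651.py | candidates
-- ===== SOURCE A (Python) =====
-- def candidates(n):
--     val = list((n - 2) * '0')
--     idx = -1
--
--     try:
--         while True:
--             val[idx] = '1' if val[idx] == '0' else '0'
--             if val[idx] == '0':
--                 idx -= 1
--             else:
--                 idx = -1
--                 yield '1' + ''.join(val) + '1'
--     except IndexError:
--         pass
-- ===== SOURCE B (Python) =====
-- def candidates(n):
--     if n >= 2:
--         w = n - 2
--         for m in range(1, 2 ** w):
--             yield '1' + format(m, '0{}b'.format(w)) + '1'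
-- ===== Notes on version B (the rewrite author's own statement) =====
-- stated objective: simpler
-- what changed: Replaces the mutable char-array ripple-carry counter with exception-driven termination by a direct integer loop: for m in range(1, 2**(n-2)) yield '1' + format(m, zero-padded binary of width n-2) + '1'.
import Mathlib
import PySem

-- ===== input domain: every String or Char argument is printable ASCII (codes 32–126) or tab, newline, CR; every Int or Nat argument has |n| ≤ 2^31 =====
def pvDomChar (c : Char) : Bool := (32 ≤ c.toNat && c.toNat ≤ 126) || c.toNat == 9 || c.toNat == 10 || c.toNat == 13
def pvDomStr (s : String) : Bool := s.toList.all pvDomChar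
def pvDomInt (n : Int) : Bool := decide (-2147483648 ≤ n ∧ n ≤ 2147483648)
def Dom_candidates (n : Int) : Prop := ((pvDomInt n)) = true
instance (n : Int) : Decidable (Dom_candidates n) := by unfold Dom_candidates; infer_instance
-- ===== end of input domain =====

-- B replaces A's mutable char-array ripple-carry counter (stopped by IndexError) with a
-- direct integer loop formatting each middle value in zero-padded binary; objective: simpler.
-- Both are generators in Python; the ports return the list of yielded strings.

-- ===== PORT A =====
-- The 'while True' loop, made total by a fuel guard that provably suffices
-- ((len+1)*2^len flips cover every increment plus the final overflow run).
def candidatesLoop : Nat → List Char → Int → List String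
  | 0, _, _ => []
  | fuel+1, val, idx =>
    match PySem.List.pyGet? val idx with            -- val[idx] read; none = IndexError → stop
    | none => []
    | some c =>
      let c' : Char := if c = '0' then '1' else '0'
      let val' := PySem.List.pySetD val idx c'       -- val[idx] = c' (in range: the read above succeeded)
      if c' = '0' then candidatesLoop fuel val' (idx - 1)
      else ("1" ++ String.mk val' ++ "1") :: candidatesLoop fuel val' (-1)

def candidates (n : Int) : List String :=
  let val := List.replicate (n - 2).toNat '0'        -- list((n-2)*'0'); negative repeat count gives ''
  candidatesLoop ((val.length + 1) * 2 ^ val.length) val (-1)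

-- ===== PORT B =====
-- binary digits of m, most significant first ([] for 0)
def toBin : Nat → List Char
  | 0 => []
  | m+1 => toBin ((m+1)/2) ++ [if (m+1) % 2 = 1 then '1' else '0']
decreasing_by exact Nat.div_lt_self (Nat.succ_pos m) (by norm_num)

-- format(m, '0{w}b'): binary representation left-padded with '0' to width w (no truncation)
def fmtBin (w : Nat) (m : Nat) : List Char :=
  let ds := if m = 0 then ['0'] else toBin m
  List.replicate (w - ds.length) '0' ++ ds

def candidates_alt (n : Int) : List String :=
  if n ≥ 2 then
    (PySem.List.pyRange 1 (2 ^ (n - 2).toNat) 1).map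
      (fun m => "1" ++ String.mk (fmtBin (n - 2).toNat m.toNat) ++ "1")
  else []

-- ===== PRECONDITION & SPEC =====
def Spec_candidates (n : Int) (out : List String) : Prop := out = candidates_alt n
instance (n : Int) (out : List String) : Decidable (Spec_candidates n out) := by unfold Spec_candidates; infer_instance

-- ===== CLAIM (what is proved, stated in full; the proofs are below) =====
def Claim_equal_candidates : Prop := ∀ (n : Int), Dom_candidates n → Spec_candidates n (candidates n)

-- ===== LEMMAS AND PROOFS =====

-- fixed-width binary digits of m, most significant first (proof-side abstraction of the counter state)
def bits : Nat → Nat → List Char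
  | 0, _ => []
  | k+1, m => bits k (m / 2) ++ [if m % 2 = 1 then '1' else '0']

theorem bits_zero (k : Nat) : bits k 0 = List.replicate k '0' := by
  induction k with
  | zero => rfl
  | succ k ih => simp [bits, ih, List.replicate_succ' (n := k)]

theorem bits_allones (k : Nat) : bits k (2 ^ k - 1) = List.replicate k '1' := by
  induction k with
  | zero => rfl
  | succ k ih =>
    have h1 : (2 ^ (k+1) - 1) / 2 = 2 ^ k - 1 := by
      have : 2 ^ (k+1) = 2 * 2 ^ k := by ring
      omega
    have h2 : (2 ^ (k+1) - 1) % 2 = 1 := by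
      have : 2 ^ (k+1) = 2 * 2 ^ k := by ring
      have hk : 1 ≤ 2 ^ k := Nat.one_le_two_pow
      omega
    simp [bits, h1, h2, ih, List.replicate_succ' (n := k)]

theorem toBin_succ (m : Nat) (h : 1 ≤ m) :
    toBin m = toBin (m / 2) ++ [if m % 2 = 1 then '1' else '0'] := by
  obtain ⟨m', rfl⟩ : ∃ m', m = m' + 1 := ⟨m - 1, by omega⟩
  simp [toBin]

-- bits equals left-padded minimal binary representation
theorem bits_eq_pad (k : Nat) : ∀ m : Nat, m < 2 ^ k →
    bits k m = List.replicate (k - (toBin m).length) '0' ++ toBin m := by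
  induction k with
  | zero => intro m hm; interval_cases m; simp [bits, toBin]
  | succ k ih =>
    intro m hm
    by_cases h0 : m = 0
    · subst h0
      simp [bits_zero, toBin]
    · have h1 : 1 ≤ m := by omega
      have hdiv : m / 2 < 2 ^ k := by
        have : 2 ^ (k+1) = 2 * 2 ^ k := by ring
        omega
      have hlen : (toBin m).length = (toBin (m / 2)).length + 1 := by
        rw [toBin_succ m h1]; simp
      have hk : k + 1 - ((toBin (m / 2)).length + 1) = k - (toBin (m / 2)).length := by omega
      rw [bits, ih (m / 2) hdiv, toBin_succ m h1, List.append_assoc]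
      simp [hk]

-- incrementing: trailing-ones decomposition of consecutive fixed-width values
theorem bits_decomp (k : Nat) : ∀ m : Nat, m + 1 < 2 ^ k →
    ∃ (a : List Char) (t : Nat),
      a.length + 1 + t = k ∧
      bits k m = a ++ '0' :: List.replicate t '1' ∧
      bits k (m + 1) = a ++ '1' :: List.replicate t '0' := by
  induction k with
  | zero => intro m hm; omega
  | succ k ih =>
    intro m hm
    by_cases hb : m % 2 = 1
    · -- last bit 1: carry
      have hq : m / 2 + 1 < 2 ^ k := by
        have : 2 ^ (k+1) = 2 * 2 ^ k := by ring
        omega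
      obtain ⟨a, t, hlen, h1, h2⟩ := ih (m / 2) hq
      refine ⟨a, t + 1, by simpa using by omega, ?_, ?_⟩
      · have : bits (k+1) m = bits k (m / 2) ++ ['1'] := by simp [bits, hb]
        rw [this, h1]
        simp [List.replicate_succ' (n := t)]
      · have hd : (m + 1) / 2 = m / 2 + 1 := by omega
        have hm2 : (m + 1) % 2 = 0 := by omega
        have : bits (k+1) (m+1) = bits k (m / 2 + 1) ++ ['0'] := by
          simp [bits, hd, hm2]
        rw [this, h2]
        simp [List.replicate_succ' (n := t)]
    · -- last bit 0: just flip it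
      have hb0 : m % 2 = 0 := by omega
      have hd : (m + 1) / 2 = m / 2 := by omega
      have hm2 : (m + 1) % 2 = 1 := by omega
      refine ⟨bits k (m / 2), 0, ?_, ?_, ?_⟩
      · have : (bits k (m / 2)).length = k := by
          clear hb hb0 hd hm2 hm ih
          induction k generalizing m with
          | zero => rfl
          | succ k ih => simp [bits, ih]
        omega
      · simp [bits, hb0]
      · simp [bits, hd, hm2]

-- one loop step, split by what val[idx] reads ('0': flip to '1' and yield; '1': flip to '0' and carry; none: stop)
theorem step_some0 (fuel : Nat) (val : List Char) (idx : Int)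
    (h : PySem.List.pyGet? val idx = some '0') :
    candidatesLoop (fuel + 1) val idx =
      ("1" ++ String.mk (PySem.List.pySetD val idx '1') ++ "1") ::
        candidatesLoop fuel (PySem.List.pySetD val idx '1') (-1) := by
  show (match PySem.List.pyGet? val idx with
    | none => []
    | some c =>
      let c' : Char := if c = '0' then '1' else '0'
      let val' := PySem.List.pySetD val idx c'
      if c' = '0' then candidatesLoop fuel val' (idx - 1)
      else ("1" ++ String.mk val' ++ "1") :: candidatesLoop fuel val' (-1)) = _
  rw [h]
  rfl

theorem step_some1 (fuel : Nat) (val : List Char) (idx : Int)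
    (h : PySem.List.pyGet? val idx = some '1') :
    candidatesLoop (fuel + 1) val idx =
      candidatesLoop fuel (PySem.List.pySetD val idx '0') (idx - 1) := by
  show (match PySem.List.pyGet? val idx with
    | none => []
    | some c =>
      let c' : Char := if c = '0' then '1' else '0'
      let val' := PySem.List.pySetD val idx c'
      if c' = '0' then candidatesLoop fuel val' (idx - 1)
      else ("1" ++ String.mk val' ++ "1") :: candidatesLoop fuel val' (-1)) = _
  rw [h]
  rfl

theorem step_none (fuel : Nat) (val : List Char) (idx : Int)
    (h : PySem.List.pyGet? val idx = none) :
    candidatesLoop (fuel + 1) val idx = [] := by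
  show (match PySem.List.pyGet? val idx with
    | none => ([] : List String)
    | some c =>
      let c' : Char := if c = '0' then '1' else '0'
      let val' := PySem.List.pySetD val idx c'
      if c' = '0' then candidatesLoop fuel val' (idx - 1)
      else ("1" ++ String.mk val' ++ "1") :: candidatesLoop fuel val' (-1)) = []
  rw [h]

-- negative-index read / write / out-of-range facts used by the loop analysis
theorem pyGet_mid (p q : List Char) (c : Char) (j : Nat) (hq : q.length = j) :
    PySem.List.pyGet? (p ++ c :: q) (-((j : Int) + 1)) = some c := by
  subst hq
  have hc : -((q.length : Int) + 1) = -((q.length + 1 : Nat) : Int) := by push_cast; ring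
  rw [hc, PySem.List.pyGet?_neg_natCast (p ++ c :: q) (q.length + 1) (by omega) (by simp)]
  simp

theorem pySet_mid (p q : List Char) (c c' : Char) (j : Nat) (hq : q.length = j) :
    PySem.List.pySetD (p ++ c :: q) (-((j : Int) + 1)) c' = p ++ c' :: q := by
  subst hq
  have hc : -((q.length : Int) + 1) = -((q.length + 1 : Nat) : Int) := by push_cast; ring
  rw [hc]
  have hidx : PySem.List.pyIdx? (p ++ c :: q).length (-((q.length + 1 : Nat) : Int)) = some p.length := by
    unfold PySem.List.pyIdx?
    rw [if_neg (by omega), if_pos (by simp; omega)]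
    simp
  rw [PySem.List.pySetD, PySem.List.pySet?, hidx]
  simp [List.set_append]

theorem pyGet_oob (q : List Char) (j : Nat) (hq : q.length = j) :
    PySem.List.pyGet? q (-((j : Int) + 1)) = none := by
  subst hq
  rw [PySem.List.pyGet?_eq_none_iff]
  simp [PySem.Raise.InRange]

-- one carry run: flip the trailing ones (j zeros already produced), flip the '0', yield
theorem carry_run (t : Nat) : ∀ (j : Nat) (a : List Char) (fuel : Nat),
    candidatesLoop (fuel + t + 1) (a ++ '0' :: (List.replicate t '1' ++ List.replicate j '0')) (-((j : Int) + 1)) =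
      ("1" ++ String.mk (a ++ '1' :: List.replicate (t + j) '0') ++ "1") ::
        candidatesLoop fuel (a ++ '1' :: List.replicate (t + j) '0') (-1) := by
  induction t with
  | zero =>
    intro j a fuel
    rw [show fuel + 0 + 1 = fuel + 1 from rfl,
      step_some0 fuel _ _ (pyGet_mid a (List.replicate 0 '1' ++ List.replicate j '0') '0' j (by simp)),
      pySet_mid a (List.replicate 0 '1' ++ List.replicate j '0') '0' '1' j (by simp)]
    simp
  | succ t ih =>
    intro j a fuel
    have hshape : a ++ '0' :: (List.replicate (t + 1) '1' ++ List.replicate j '0') =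
        (a ++ '0' :: List.replicate t '1') ++ '1' :: List.replicate j '0' := by
      rw [List.replicate_succ' (n := t)]
      simp
    rw [hshape, show fuel + (t + 1) + 1 = (fuel + t + 1) + 1 by omega,
      step_some1 (fuel + t + 1) _ _
        (pyGet_mid (a ++ '0' :: List.replicate t '1') (List.replicate j '0') '1' j (by simp)),
      pySet_mid (a ++ '0' :: List.replicate t '1') (List.replicate j '0') '1' '0' j (by simp)]
    have hback : (a ++ '0' :: List.replicate t '1') ++ '0' :: List.replicate j '0' =
        a ++ '0' :: (List.replicate t '1' ++ List.replicate (j + 1) '0') := by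
      rw [List.replicate_succ (n := j)]
      simp
    have hidx : -((j : Int) + 1) - 1 = -(((j + 1 : Nat) : Int) + 1) := by push_cast; ring
    rw [hback, hidx, ih (j + 1) a fuel]
    have : t + (j + 1) = t + 1 + j := by omega
    rw [this]

-- overflow run: all remaining bits are ones; flipping them all exhausts the list (IndexError)
theorem overflow_run (t : Nat) : ∀ (j : Nat) (fuel : Nat),
    candidatesLoop (fuel + t + 1) (List.replicate t '1' ++ List.replicate j '0') (-((j : Int) + 1)) = [] := by
  induction t with
  | zero =>
    intro j fuel
    rw [show fuel + 0 + 1 = fuel + 1 from rfl]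
    exact step_none fuel _ _ (pyGet_oob (List.replicate 0 '1' ++ List.replicate j '0') j (by simp))
  | succ t ih =>
    intro j fuel
    have hshape : List.replicate (t + 1) '1' ++ List.replicate j '0' =
        (List.replicate t '1') ++ '1' :: List.replicate j '0' := by
      rw [List.replicate_succ' (n := t)]
      simp
    rw [hshape, show fuel + (t + 1) + 1 = (fuel + t + 1) + 1 by omega,
      step_some1 (fuel + t + 1) _ _
        (pyGet_mid (List.replicate t '1') (List.replicate j '0') '1' j (by simp)),
      pySet_mid (List.replicate t '1') (List.replicate j '0') '1' '0' j (by simp)]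
    have hback : List.replicate t '1' ++ '0' :: List.replicate j '0' =
        List.replicate t '1' ++ List.replicate (j + 1) '0' := by
      rw [List.replicate_succ (n := j)]
    have hidx : -((j : Int) + 1) - 1 = -(((j + 1 : Nat) : Int) + 1) := by push_cast; ring
    rw [hback, hidx]
    simpa using ih (j + 1) fuel

-- the main enumeration: from value m the loop yields bits of m+1 .. 2^k-1 then stops
theorem loop_main (k : Nat) : ∀ (d m fuel : Nat), m + d = 2 ^ k - 1 →
    candidatesLoop (fuel + (k + 1) * (d + 1)) (bits k m) (-1) =
      (List.range' (m + 1) d).map (fun v => "1" ++ String.mk (bits k v) ++ "1") := by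
  intro d
  induction d with
  | zero =>
    intro m fuel hm
    have hm' : m = 2 ^ k - 1 := by omega
    subst hm'
    rw [bits_allones k]
    have h0 : candidatesLoop (fuel + (k + 1) * 1) (List.replicate k '1') (-1) =
        candidatesLoop (fuel + k + 1) (List.replicate k '1' ++ List.replicate 0 '0') (-(((0 : Nat) : Int) + 1)) := by
      rw [show fuel + (k + 1) * 1 = fuel + k + 1 by ring]
      norm_num
    rw [h0, overflow_run k 0 fuel]
    simp
  | succ d ih =>
    intro m fuel hm
    have h2 : 1 ≤ 2 ^ k := Nat.one_le_two_pow
    have hlt : m + 1 < 2 ^ k := by omega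
    obtain ⟨a, t, hlen, hm1, hm2⟩ := bits_decomp k m hlt
    have ht : t + 1 ≤ k := by omega
    have hfuel : fuel + (k + 1) * (d + 1 + 1) = (fuel + (k - t) + (k + 1) * (d + 1)) + t + 1 := by
      have hx : (k + 1) * (d + 1 + 1) = (k + 1) * (d + 1) + (k + 1) := by ring
      omega
    have hc := carry_run t 0 a (fuel + (k - t) + (k + 1) * (d + 1))
    rw [hm1, hfuel]
    have hz : -((0 : Nat) : Int) - 1 = -1 := by norm_num
    have h0 : (List.replicate t '1' ++ List.replicate 0 '0') = List.replicate t '1' := by simp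
    rw [show (-1 : Int) = -(((0 : Nat) : Int) + 1) by norm_num, ← h0, hc]
    have hval : a ++ '1' :: List.replicate (t + 0) '0' = bits k (m + 1) := by
      rw [hm2]; simp
    rw [hval, ih (m + 1) (fuel + (k - t)) (by omega)]
    rw [List.range'_succ]
    simp

theorem fmtBin_eq_bits (k m : Nat) (h1 : 1 ≤ m) (h2 : m < 2 ^ k) :
    fmtBin k m = bits k m := by
  rw [bits_eq_pad k m h2, fmtBin]
  have h0 : m ≠ 0 := by omega
  simp [h0]

theorem candidates_eq (n : Int) : candidates n = candidates_alt n := by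
  have hmain : ∀ k : Nat, candidatesLoop ((k + 1) * 2 ^ k) (List.replicate k '0') (-1) =
      (List.range' 1 (2 ^ k - 1)).map (fun v => "1" ++ String.mk (bits k v) ++ "1") := by
    intro k
    have h2 : 1 ≤ 2 ^ k := Nat.one_le_two_pow
    have hf : (k + 1) * 2 ^ k = 0 + (k + 1) * ((2 ^ k - 1) + 1) := by
      have : 2 ^ k - 1 + 1 = 2 ^ k := by omega
      rw [this]; omega
    rw [← bits_zero k, hf, loop_main k (2 ^ k - 1) 0 0 (by omega)]
  by_cases hn : n ≥ 2
  · set k := (n - 2).toNat with hk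
    rw [candidates, candidates_alt, if_pos hn]
    simp only [List.length_replicate]
    rw [hmain k, PySem.List.pyRange_one]
    have hb : ((2 : Int) ^ k - 1).toNat = 2 ^ k - 1 := by
      have : ((2 : Int) ^ k) = ((2 ^ k : Nat) : Int) := by push_cast; ring
      omega
    rw [hb, List.range'_eq_map_range, List.map_map, List.map_map]
    apply List.map_congr_left
    intro i hi
    simp only [List.mem_range] at hi
    simp only [Function.comp_apply]
    have htn : ((1 : Int) + i).toNat = 1 + i := by omega
    rw [htn, fmtBin_eq_bits k (1 + i) (by omega) (by omega)]
  · rw [candidates, candidates_alt, if_neg hn]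
    have hk0 : (n - 2).toNat = 0 := by omega
    rw [hk0]
    simp only [List.length_replicate]
    rw [hmain 0]
    simp

-- ===== VERDICT (by name: the statement is the Claim_ definition above) =====
theorem candidates_spec : Claim_equal_candidates := by
  intro n _
  exact candidates_eq n
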